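-- pv_equiv track=rewrite | github.com/postman-patt/JSpractice | zalgo.py | solution
-- ===== SOURCE A (Python) =====
-- def solution(s):
--
--     z = [0 for x in range(len(s))]
--     left = 0
--     right = 0
--
--     for k in range(len(s)):
--         if k > right:
--             left = right = k
--             while(right < len(s) and s[right] == s[right - left]):
--                 right += 1
--             z[k] = right - left
--             right -= 1
--         else:
--             k1 = k - left
--             if z[k1] < right - k +1:
--                 z[k] = z[k1]
--             else:
--                 left = k
--                 while right < len(s) and s[right] == s[right -left]:
--                     right += 1
--                 z[k] = right - left
--                 right -= 1
--
--     return sum(z) + len(s)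
-- ===== SOURCE B (Python) =====
-- def solution(s):
--     n = len(s)
--     total = n
--     for k in range(1, n):
--         c = 0
--         while k + c < n and s[k + c] == s[c]:
--             c += 1
--         total += c
--     return total
-- ===== Notes on version B (the rewrite author's own statement) =====
-- stated objective: simpler
-- what changed: Replaces the windowed [left,right] Z-algorithm with naive per-position prefix matching: for each k>=1 count matching characters of s[k:] against s from scratch and add to len(s), with no Z-array, no window state and no copy-from-earlier-entry step.
import Mathlib
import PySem

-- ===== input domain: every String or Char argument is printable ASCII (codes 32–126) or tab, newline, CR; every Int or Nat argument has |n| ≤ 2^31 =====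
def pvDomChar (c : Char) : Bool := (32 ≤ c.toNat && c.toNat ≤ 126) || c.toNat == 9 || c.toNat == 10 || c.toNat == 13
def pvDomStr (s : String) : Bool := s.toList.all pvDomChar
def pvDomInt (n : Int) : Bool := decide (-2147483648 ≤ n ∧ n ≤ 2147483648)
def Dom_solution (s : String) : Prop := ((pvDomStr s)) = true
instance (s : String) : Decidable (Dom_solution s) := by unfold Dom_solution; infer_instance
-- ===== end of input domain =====

-- B replaces A's windowed Z-algorithm by naive per-position prefix matching (simpler; no speed claim).
-- All of A's loop variables (k, left, right, z entries) are provably nonnegative Python ints; they are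
-- ported as Nat (every subtraction below happens where the Python value is ≥ 0).

-- ===== PORT A =====
-- A's inner while loop: 'while right < len(s) and s[right] == s[right-left]: right += 1'
def pvExtendA (l : List Char) (left : Nat) (right : Nat) : Nat :=
  if h : right < l.length ∧ l.getD right ' ' = l.getD (right - left) ' ' then
    pvExtendA l left (right + 1)
  else right
termination_by l.length - right
decreasing_by omega

-- one iteration of A's 'for k in range(len(s))' loop over the state (z, left, right)
def pvStepA (l : List Char) (st : List Nat × Nat × Nat) (k : Nat) : List Nat × Nat × Nat :=
  let z := st.1; let left := st.2.1; let right := st.2.2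
  if k > right then
    let r := pvExtendA l k k
    (z.set k (r - k), k, r - 1)
  else
    let k1 := k - left
    if z.getD k1 0 < right - k + 1 then
      (z.set k (z.getD k1 0), left, right)
    else
      let r := pvExtendA l k right
      (z.set k (r - k), k, r - 1)

def solution (s : String) : Int :=
  let l := s.toList
  let n := l.length
  let st := (List.range n).foldl (pvStepA l) (List.replicate n 0, 0, 0)
  (st.1.sum : Int) + (n : Int)

-- ===== PORT B =====
-- B's inner while loop: 'while k + c < n and s[k+c] == s[c]: c += 1'
def pvCountB (l : List Char) (k : Nat) (c : Nat) : Nat :=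
  if h : k + c < l.length ∧ l.getD (k + c) ' ' = l.getD c ' ' then
    pvCountB l k (c + 1)
  else c
termination_by l.length - (k + c)
decreasing_by omega

def solution_alt (s : String) : Int :=
  let l := s.toList
  let n := l.length
  ((List.range' 1 (n - 1)).foldl (fun total k => total + pvCountB l k 0) n : Nat)

-- ===== PRECONDITION & SPEC =====
def Spec_solution (s : String) (out : Int) : Prop := out = solution_alt s
instance (s : String) (out : Int) : Decidable (Spec_solution s out) := by unfold Spec_solution; infer_instance

-- ===== CLAIM (what is proved, stated in full; the proofs are below) =====
def Claim_equal_solution : Prop := ∀ (s : String), Dom_solution s → Spec_solution s (solution s)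

-- ===== LEMMAS AND PROOFS =====

-- value of A's z-array at position k after the loop (z[0] = 0 by A's construction)
def pvZv (l : List Char) (k : Nat) : Nat := if k = 0 then 0 else pvCountB l k 0

theorem pvCountB_matched (l : List Char) (k c : Nat) :
    ∀ t, c ≤ t → t < pvCountB l k c →
      k + t < l.length ∧ l.getD (k + t) ' ' = l.getD t ' ' := by
  fun_induction pvCountB with
  | case1 c h ih =>
    intro t hct htl
    rcases Nat.eq_or_lt_of_le hct with rfl | hlt
    · exact h
    · exact ih t hlt htl
  | case2 c h =>
    intro t hct htl
    omega

theorem pvCountB_stop (l : List Char) (k c : Nat) :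
    ¬(k + pvCountB l k c < l.length ∧
      l.getD (k + pvCountB l k c) ' ' = l.getD (pvCountB l k c) ' ') := by
  fun_induction pvCountB with
  | case1 c h ih => exact ih
  | case2 c h => exact h

theorem pvCountB_eq_of_matched (l : List Char) (k : Nat) :
    ∀ c, (∀ t, t < c → k + t < l.length ∧ l.getD (k + t) ' ' = l.getD t ' ') →
      pvCountB l k c = pvCountB l k 0 := by
  intro c
  induction c with
  | zero => intro _; rfl
  | succ c ih =>
    intro h
    have hc : pvCountB l k c = pvCountB l k (c + 1) := by
      rw [pvCountB]
      exact dif_pos (h c (Nat.lt_succ_self c))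
    rw [← hc]
    exact ih (fun t ht => h t (Nat.lt_succ_of_lt ht))

theorem pvCountB_unique (l : List Char) (k m : Nat)
    (hm : ∀ t, t < m → k + t < l.length ∧ l.getD (k + t) ' ' = l.getD t ' ')
    (hs : ¬(k + m < l.length ∧ l.getD (k + m) ' ' = l.getD m ' ')) :
    pvCountB l k 0 = m := by
  have h1 : pvCountB l k m = m := by rw [pvCountB]; exact dif_neg hs
  rw [← pvCountB_eq_of_matched l k m hm, h1]

theorem pvCountB_add_le (l : List Char) (k : Nat) (h : k ≤ l.length) :
    k + pvCountB l k 0 ≤ l.length := by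
  rcases Nat.eq_zero_or_pos (pvCountB l k 0) with h0 | h0
  · omega
  · have := (pvCountB_matched l k 0 (pvCountB l k 0 - 1) (Nat.zero_le _) (by omega)).1
    omega

theorem pvExtendA_eq (l : List Char) (left : Nat) :
    ∀ r, left ≤ r → pvExtendA l left r = left + pvCountB l left (r - left) := by
  intro r
  fun_induction pvExtendA with
  | case1 r h ih =>
    intro hlr
    have e : left + (r - left) = r := by omega
    have hc : pvCountB l left (r - left) = pvCountB l left (r - left + 1) := by
      rw [pvCountB]
      refine dif_pos ?_
      rw [e]
      exact h
    have e2 : r - left + 1 = r + 1 - left := by omega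
    rw [hc, e2]
    exact ih (by omega)
  | case2 r h =>
    intro hlr
    have e : left + (r - left) = r := by omega
    have hc : pvCountB l left (r - left) = r - left := by
      rw [pvCountB]
      refine dif_neg ?_
      rw [e]
      exact h
    omega

theorem pvGetD_set_self (z : List Nat) (k v : Nat) (h : k < z.length) :
    (z.set k v).getD k 0 = v := by
  simp [List.getD_eq_getElem?_getD, h]

theorem pvGetD_set_ne (z : List Nat) (k v j : Nat) (h : j ≠ k) :
    (z.set k v).getD j 0 = z.getD j 0 := by
  simp [List.getD_eq_getElem?_getD, List.getElem?_set_ne (Ne.symm h)]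

theorem pvStepA_gt (l : List Char) (z : List Nat) (left right k : Nat) (h : k > right) :
    pvStepA l (z, left, right) k =
      (z.set k (pvExtendA l k k - k), k, pvExtendA l k k - 1) := by
  simp only [pvStepA]
  rw [if_pos h]

theorem pvStepA_copy (l : List Char) (z : List Nat) (left right k : Nat)
    (h1 : ¬ k > right) (h2 : z.getD (k - left) 0 < right - k + 1) :
    pvStepA l (z, left, right) k = (z.set k (z.getD (k - left) 0), left, right) := by
  simp only [pvStepA]
  rw [if_neg h1, if_pos h2]

theorem pvStepA_ext (l : List Char) (z : List Nat) (left right k : Nat)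
    (h1 : ¬ k > right) (h2 : ¬ z.getD (k - left) 0 < right - k + 1) :
    pvStepA l (z, left, right) k =
      (z.set k (pvExtendA l k right - k), k, pvExtendA l k right - 1) := by
  simp only [pvStepA]
  rw [if_neg h1, if_neg h2]

-- loop invariant of A's for-loop before processing index m
def pvInv (l : List Char) (m : Nat) (st : List Nat × Nat × Nat) : Prop :=
  st.1.length = l.length ∧
  (∀ j, j < m → st.1.getD j 0 = pvZv l j) ∧
  (∀ j, m ≤ j → st.1.getD j 0 = 0) ∧
  (m = 0 → st.2.1 = 0 ∧ st.2.2 = 0) ∧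
  (1 ≤ m → (st.2.2 < m ∨
    (1 ≤ st.2.1 ∧ st.2.1 < m ∧ st.2.2 + 1 = st.2.1 + pvCountB l st.2.1 0)))

theorem pvStep_inv (l : List Char) (m : Nat) (st : List Nat × Nat × Nat)
    (hm : m < l.length) (hinv : pvInv l m st) : pvInv l (m + 1) (pvStepA l st m) := by
  obtain ⟨z, left, right⟩ := st
  obtain ⟨hlen, hdone, hzero, hinit, hwin⟩ := hinv
  simp only at hlen hdone hzero hinit hwin
  by_cases hbr : m > right
  · -- first branch: k > right
    have hm1 : 1 ≤ m := by omega
    have hext : pvExtendA l m m = m + pvCountB l m 0 := by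
      have := pvExtendA_eq l m m (le_refl m)
      simpa using this
    rw [pvStepA_gt l z left right m hbr]
    unfold pvInv
    dsimp only
    refine ⟨by simpa using hlen, ?_, ?_, by omega, ?_⟩
    · intro j hj
      rcases Nat.lt_or_ge j m with hjm | hjm
      · rw [pvGetD_set_ne _ _ _ _ (by omega)]
        exact hdone j hjm
      · have hjm' : j = m := by omega
        subst hjm'
        rw [pvGetD_set_self _ _ _ (by omega), hext]
        simp only [pvZv, if_neg (by omega : ¬ j = 0)]
        omega
    · intro j hj
      rw [pvGetD_set_ne _ _ _ _ (by omega)]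
      exact hzero j (by omega)
    · intro _
      right
      refine ⟨hm1, by omega, ?_⟩
      rw [hext] at *
      omega
  · -- else branch: k ≤ right
    have hmr : m ≤ right := by omega
    rcases Nat.eq_zero_or_pos m with rfl | hm1
    · -- m = 0: copy branch with z[0] = 0
      obtain ⟨hl0, hr0⟩ := hinit rfl
      subst hl0; subst hr0
      have hz0 : z.getD 0 0 = 0 := hzero 0 (le_refl 0)
      rw [pvStepA_copy l z 0 0 0 hbr (by rw [hz0]; omega)]
      unfold pvInv
      dsimp only
      refine ⟨by simpa using hlen, ?_, ?_, by omega, ?_⟩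
      · intro j hj
        have hj0 : j = 0 := by omega
        subst hj0
        rw [pvGetD_set_self _ _ _ (by omega)]
        simpa [pvZv] using hz0
      · intro j hj
        rw [pvGetD_set_ne _ _ _ _ (by omega)]
        exact hzero j (by omega)
      · intro _
        left
        omega
    · -- m ≥ 1, window valid
      have hwin' := hwin hm1
      have hw : 1 ≤ left ∧ left < m ∧ right + 1 = left + pvCountB l left 0 := by
        rcases hwin' with h | h
        · omega
        · exact h
      obtain ⟨hl1, hlm, hweq⟩ := hw
      have hk1ge : 1 ≤ m - left := by omega
      have hk1lt : m - left < m := by omega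
      have hrn : right < l.length := by
        have := pvCountB_add_le l left (by omega)
        omega
      have hWm : ∀ t, t < pvCountB l left 0 →
          left + t < l.length ∧ l.getD (left + t) ' ' = l.getD t ' ' :=
        fun t ht => pvCountB_matched l left 0 t (Nat.zero_le _) ht
      have hzk1 : z.getD (m - left) 0 = pvCountB l (m - left) 0 := by
        rw [hdone (m - left) hk1lt]
        simp only [pvZv, if_neg (by omega : ¬ m - left = 0)]
      have hK1m : ∀ t, t < pvCountB l (m - left) 0 →
          (m - left) + t < l.length ∧ l.getD ((m - left) + t) ' ' = l.getD t ' ' :=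
        fun t ht => pvCountB_matched l (m - left) 0 t (Nat.zero_le _) ht
      have hK1s := pvCountB_stop l (m - left) 0
      by_cases hcopy : z.getD (m - left) 0 < right - m + 1
      · -- copy branch: z[m] := z[k1]
        have hz1W : pvCountB l (m - left) 0 < right - m + 1 := by rw [hzk1] at hcopy; exact hcopy
        have hkey : pvCountB l m 0 = pvCountB l (m - left) 0 := by
          apply pvCountB_unique
          · intro t ht
            have hk1t : (m - left) + t < pvCountB l left 0 := by omega
            have e : m + t = left + ((m - left) + t) := by omega
            obtain ⟨hb, he⟩ := hWm ((m - left) + t) hk1t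
            obtain ⟨hb2, he2⟩ := hK1m t ht
            rw [e]
            exact ⟨hb, by rw [he, he2]⟩
          · rintro ⟨hb, he⟩
            have hk1z : (m - left) + pvCountB l (m - left) 0 < pvCountB l left 0 := by omega
            obtain ⟨hb', he'⟩ := hWm _ hk1z
            have e : m + pvCountB l (m - left) 0 =
                left + ((m - left) + pvCountB l (m - left) 0) := by omega
            apply hK1s
            refine ⟨by omega, ?_⟩
            rw [← he', ← e, he]
        rw [pvStepA_copy l z left right m hbr hcopy]
        unfold pvInv
        dsimp only
        refine ⟨by simpa using hlen, ?_, ?_, by omega, ?_⟩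
        · intro j hj
          rcases Nat.lt_or_ge j m with hjm | hjm
          · rw [pvGetD_set_ne _ _ _ _ (by omega)]
            exact hdone j hjm
          · have hjm' : j = m := by omega
            subst hjm'
            rw [pvGetD_set_self _ _ _ (by omega), hzk1]
            simp only [pvZv, if_neg (by omega : ¬ j = 0)]
            rw [hkey]
        · intro j hj
          rw [pvGetD_set_ne _ _ _ _ (by omega)]
          exact hzero j (by omega)
        · intro _
          right
          exact ⟨hl1, by omega, by omega⟩
      · -- extend branch
        have hz1W : right - m + 1 ≤ pvCountB l (m - left) 0 := by rw [hzk1] at hcopy; omega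
        have hmatch : ∀ t, t < right - m →
            m + t < l.length ∧ l.getD (m + t) ' ' = l.getD t ' ' := by
          intro t ht
          have hk1t : (m - left) + t < pvCountB l left 0 := by omega
          have e : m + t = left + ((m - left) + t) := by omega
          obtain ⟨hb, he⟩ := hWm ((m - left) + t) hk1t
          obtain ⟨hb2, he2⟩ := hK1m t (by omega)
          rw [e]
          exact ⟨hb, by rw [he, he2]⟩
        have hext : pvExtendA l m right = m + pvCountB l m 0 := by
          rw [pvExtendA_eq l m right hmr, pvCountB_eq_of_matched l m (right - m) hmatch]
        rw [pvStepA_ext l z left right m hbr hcopy]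
        unfold pvInv
        dsimp only
        refine ⟨by simpa using hlen, ?_, ?_, by omega, ?_⟩
        · intro j hj
          rcases Nat.lt_or_ge j m with hjm | hjm
          · rw [pvGetD_set_ne _ _ _ _ (by omega)]
            exact hdone j hjm
          · have hjm' : j = m := by omega
            subst hjm'
            rw [pvGetD_set_self _ _ _ (by omega), hext]
            simp only [pvZv, if_neg (by omega : ¬ j = 0)]
            omega
        · intro j hj
          rw [pvGetD_set_ne _ _ _ _ (by omega)]
          exact hzero j (by omega)
        · intro _
          right
          refine ⟨hm1, by omega, ?_⟩
          rw [hext] at *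
          omega

theorem pvInv_foldl (l : List Char) :
    ∀ m, m ≤ l.length →
      pvInv l m ((List.range m).foldl (pvStepA l) (List.replicate l.length 0, 0, 0)) := by
  intro m
  induction m with
  | zero =>
    intro _
    refine ⟨by simp, by omega, ?_, by simp, by omega⟩
    intro j _
    simp only [List.range_zero, List.foldl_nil, List.getD_eq_getElem?_getD,
      List.getElem?_replicate]
    split <;> simp
  | succ m ih =>
    intro hm
    rw [List.range_succ, List.foldl_append, List.foldl_cons, List.foldl_nil]
    exact pvStep_inv l m _ (by omega) (ih (by omega))

theorem pvFoldl_add_nat (f : Nat → Nat) :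
    ∀ (xs : List Nat) (a : Nat), xs.foldl (fun t k => t + f k) a = a + (xs.map f).sum := by
  intro xs
  induction xs with
  | nil => intro a; simp
  | cons x xs ih => intro a; simp [ih, Nat.add_assoc]

theorem pvZ_sum (l : List Char) :
    ((List.range l.length).foldl (pvStepA l) (List.replicate l.length 0, 0, 0)).1.sum =
      ((List.range l.length).map (pvZv l)).sum := by
  obtain ⟨hlen, hdone, -, -, -⟩ := pvInv_foldl l l.length (le_refl _)
  congr 1
  apply List.ext_getElem
  · simp [hlen]
  · intro i h1 h2
    have hi : i < l.length := by simpa [hlen] using h1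
    have := hdone i hi
    rw [List.getD_eq_getElem _ _ (by omega)] at this
    simpa using this

theorem solution_spec : Claim_equal_solution := by
  intro s _
  unfold Spec_solution solution solution_alt
  dsimp only
  rw [pvZ_sum s.toList, pvFoldl_add_nat]
  rcases Nat.eq_zero_or_pos s.toList.length with h0 | hpos
  · simp [h0]
  · have hr : List.range s.toList.length = 0 :: List.range' 1 (s.toList.length - 1) := by
      rw [List.range_eq_range']
      have : s.toList.length = (s.toList.length - 1) + 1 := by omega
      rw [this, List.range'_succ]
      simp
    rw [hr]
    have hmap : (List.range' 1 (s.toList.length - 1)).map (pvZv s.toList) =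
        (List.range' 1 (s.toList.length - 1)).map (fun k => pvCountB s.toList k 0) := by
      apply List.map_congr_left
      intro k hk
      have : 1 ≤ k := by
        rw [List.mem_range'] at hk
        omega
      simp only [pvZv, if_neg (show ¬ k = 0 by omega)]
    simp only [List.map_cons, List.sum_cons, hmap]
    simp [pvZv]
    ring
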